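-- pv_equiv track=rewrite | github.com/maramamsss/programmationENSAE | delivery_network/graph.py | min_power_kruskal_2
-- ===== SOURCE A (Python) =====
-- def find_path_kruskal2(dict,src,dest):
--     """ on va regarder si src et dest sont à la même profondeur, si ce n'est pas le cas on remonte jusqu'à ce qu'ils
--     soient à la même profondeur. Après on remonte jusqu'à ce qu'ils aient le même père """
--
--     """ version finale pour trouver le chemin entre la src et le dest """
--     src_tmp=src
--     dest_tmp=dest
--     liste_gauche =[[src,0]]
--     liste_droite=[[dest,0]]
--     profondeur_src=dict[src][0]
--     profondeur_dest=dict[dest][0]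
--
--     while profondeur_src!=profondeur_dest:
--         if profondeur_src>profondeur_dest:
--             liste_gauche.append([dict[src_tmp][1],dict[src_tmp][2]])
--             src_tmp=dict[src_tmp][1]
--             profondeur_src-=1
--         else :
--             liste_droite.append([dict[dest_tmp][1],dict[dest_tmp][2]])
--             dest_tmp=dict[dest_tmp][1]
--             profondeur_dest-=1
--     #on fait les deux cas où on a juste remonté un coté de l'arbre (ie la src/dest est un descendant direct de la src/dest)
--     if src_tmp==dest:
--         return liste_gauche
--     if dest_tmp==src:
--         return liste_droite
--
--     else:
--         while src_tmp!=dest_tmp: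
--
--             liste_gauche.append([dict[src_tmp][1],dict[src_tmp][2]])
--             src_tmp=dict[src_tmp][1]
--
--             liste_droite.append([dict[dest_tmp][1],dict[dest_tmp][2]])
--             dest_tmp=dict[dest_tmp][1]
--
--         liste_droite.reverse()
--
--         liste_droite.remove(liste_droite[0])
--         return liste_gauche+liste_droite
--
-- def min_power_kruskal_2(kruskal_dict,src,dest): #complexité en O((#V**2)*#E)
--     """ approche plus optimisee, on calcule la puisance minimale pour l'ensemble d'un fichier route en l'ordre de la minute"""
--
--     """ cette fonction commence par trouver le chemin entre src et dest (qui est unique car c'est un arbre)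
--     puis on regarde la puissance minimale requise pour pouvoir emprunter ce chemin
--
--     elle prend en entree le dictionnaire qui stock les infos de l'arbre couvrant calcule par kruskal
--     """
--     chemin=find_path_kruskal2(kruskal_dict,src,dest)
--     #dfs renvoie une liste de chemin et de puissances pour emprunter chaque arête
--     max=chemin[0][1]
--     List=[]
--     for i in chemin:
--         List.append(i[0])
--         if i[1]>max:
--             max=i[1]
--     return max,List
-- ===== SOURCE B (Python) =====
-- def min_power_kruskal_2(kruskal_dict, src, dest):
--     # Trivial query: the path from a node to itself needs no climbing.
--     if src == dest:
--         return 0, [src]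
--
--     # Build each node's full ancestor chain once (pairs (node, power of the edge
--     # climbed to reach it)), find the LCA as the first src-chain node contained
--     # in a set of dest-chain nodes, and splice the two chain prefixes together.
--     def chain(x):
--         out = [(x, 0)]
--         while kruskal_dict[x][0] > 0:
--             e = kruskal_dict[x]
--             out.append((e[1], e[2]))
--             x = e[1]
--         return out
--
--     left = chain(src)
--     right = chain(dest)
--     right_nodes = set(n for n, _ in right)
--     i = 0
--     while left[i][0] not in right_nodes:
--         i += 1
--     lca = left[i][0]
--     if lca == src:
--         # src is an ancestor of dest: the path is the dest-side chain down to src,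
--         # listed (as the callers expect) from dest back to src, with every climbed
--         # edge's power in the max.
--         j = 0
--         while right[j][0] != src:
--             j += 1
--         part = right[:j + 1]
--     else:
--         j = 0
--         while right[j][0] != lca:
--             j += 1
--         part = left[:i + 1] + right[:j][::-1]
--     m = 0
--     for _, p in part:
--         if p > m:
--             m = p
--     return m, [n for n, _ in part]
-- ===== Notes on version B (the rewrite author's own statement) =====
-- stated objective: alternative
-- what changed: A interleaves three stateful climbing loops (equalise depths, two early-exit special cases, lockstep climb, then reverse/remove surgery); B builds each node's full ancestor chain once, finds the LCA as the first src-chain node contained in a set of dest-chain nodes, and splices the two chain prefixes together (returning the dest-side chain directly when src is the LCA, as A's callers expect).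
-- outside the precondition, e.g. on min_power_kruskal_2({1: [0, 1, 0], 2: [3, 1, 5]}, 2, 1): A returns (5, [2, 1, 1, 1]), B returns (5, [2, 1])
import Mathlib
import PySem

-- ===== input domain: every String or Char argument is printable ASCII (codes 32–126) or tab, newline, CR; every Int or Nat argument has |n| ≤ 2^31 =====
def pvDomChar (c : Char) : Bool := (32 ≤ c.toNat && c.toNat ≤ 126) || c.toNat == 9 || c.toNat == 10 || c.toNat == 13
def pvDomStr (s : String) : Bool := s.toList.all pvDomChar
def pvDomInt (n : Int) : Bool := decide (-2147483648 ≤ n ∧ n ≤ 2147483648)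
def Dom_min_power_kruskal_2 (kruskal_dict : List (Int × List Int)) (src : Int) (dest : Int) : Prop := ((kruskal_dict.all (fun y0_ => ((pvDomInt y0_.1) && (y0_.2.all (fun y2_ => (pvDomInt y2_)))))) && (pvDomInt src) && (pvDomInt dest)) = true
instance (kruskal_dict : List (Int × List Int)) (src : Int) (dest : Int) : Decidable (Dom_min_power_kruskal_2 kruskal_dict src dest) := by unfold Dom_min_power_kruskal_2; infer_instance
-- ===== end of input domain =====

-- B replaces A's three interleaved climbing loops by two full ancestor chains, a set-based
-- LCA scan and a splice of the two chain prefixes (objective: alternative decomposition).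

-- ===== PORT A =====
-- dict[x] (entry of node x), dict[x][0] (depth), dict[x][1] (parent), dict[x][2] (power);
-- defaults are never reached inside Pre_ (every touched key is present with an entry of length ≥ 3)
def pvGet (d : List (Int × List Int)) (x : Int) : List Int :=
  ((PySem.Dict.mk d).get? x).getD []
def pvDep (d : List (Int × List Int)) (x : Int) : Int := PySem.List.pyGetD (pvGet d x) 0 0
def pvPar (d : List (Int × List Int)) (x : Int) : Int := PySem.List.pyGetD (pvGet d x) 1 0
def pvPw (d : List (Int × List Int)) (x : Int) : Int := PySem.List.pyGetD (pvGet d x) 2 0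

-- first while loop of find_path_kruskal2: climb the deeper side until the tracked depths agree
-- (the loop always runs exactly |ps - pd| times, which the caller passes as structural fuel)
def pvPhase1 (d : List (Int × List Int)) :
    Nat → Int → Int → List (Int × Int) → List (Int × Int) → Int → Int →
      Int × Int × List (Int × Int) × List (Int × Int)
  | 0, st, dt, lg, ld, _, _ => (st, dt, lg, ld)
  | n + 1, st, dt, lg, ld, ps, pd =>
    if ps = pd then (st, dt, lg, ld)
    else if pd < ps then
      pvPhase1 d n (pvPar d st) dt (lg ++ [(pvPar d st, pvPw d st)]) ld (ps - 1) pd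
    else
      pvPhase1 d n st (pvPar d dt) lg (ld ++ [(pvPar d dt, pvPw d dt)]) ps (pd - 1)

-- second while loop: climb both sides in lockstep until they meet (fuel never runs out inside Pre_)
def pvPhase2 (d : List (Int × List Int)) :
    Nat → Int → Int → List (Int × Int) → List (Int × Int) → List (Int × Int) × List (Int × Int)
  | 0, _, _, lg, ld => (lg, ld)
  | n + 1, st, dt, lg, ld =>
    if st = dt then (lg, ld)
    else pvPhase2 d n (pvPar d st) (pvPar d dt)
      (lg ++ [(pvPar d st, pvPw d st)]) (ld ++ [(pvPar d dt, pvPw d dt)])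

-- find_path_kruskal2
def pvFindPath (d : List (Int × List Int)) (src dest : Int) : List (Int × Int) :=
  let r := pvPhase1 d (pvDep d src - pvDep d dest).natAbs src dest [(src, 0)] [(dest, 0)]
    (pvDep d src) (pvDep d dest)
  if r.1 = dest then r.2.2.1
  else if r.2.1 = src then r.2.2.2
  else
    let r2 := pvPhase2 d ((pvDep d src).natAbs + (pvDep d dest).natAbs + 1) r.1 r.2.1 r.2.2.1 r.2.2.2
    let ldr := r2.2.reverse
    r2.1 ++ ((PySem.List.remove? ldr (PySem.List.pyGetD ldr 0 (0, 0))).getD ldr)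

def min_power_kruskal_2 (kruskal_dict : List (Int × List Int)) (src : Int) (dest : Int) : Int × List Int :=
  let chemin := pvFindPath kruskal_dict src dest
  chemin.foldl (fun acc i => (if i.2 > acc.1 then i.2 else acc.1, acc.2 ++ [i.1]))
    ((PySem.List.pyGetD chemin 0 (0, 0)).2, ([] : List Int))

-- ===== PORT B =====
-- chain(x): the full ancestor chain of x with the power of each climbed edge
-- (the while loop is fueled by the recorded depth, which inside Pre_ is exactly its trip count)
def pvClimb (d : List (Int × List Int)) : Nat → Int → List (Int × Int)
  | 0, _ => []
  | n + 1, x =>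
    if 0 < pvDep d x then (pvPar d x, pvPw d x) :: pvClimb d n (pvPar d x) else []

def pvChain (d : List (Int × List Int)) (x : Int) : List (Int × Int) :=
  (x, (0 : Int)) :: pvClimb d (pvDep d x).natAbs x

-- the `while left[i][0] not in right_nodes: i += 1` scan: prefix of left up to and
-- including the first entry whose node lies in rs, together with that node (the LCA)
def pvScan (rs : PySem.Set Int) : List (Int × Int) → List (Int × Int) × Int
  | [] => ([], 0)
  | e :: rest =>
    if rs.contains e.1 then ([e], e.1)
    else
      let r := pvScan rs rest
      (e :: r.1, r.2)

-- the `while right[j][0] != src: j += 1` scan followed by `right[:j + 1]`: prefix of the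
-- chain up to and including the first entry whose node is v
def pvTakeThrough (v : Int) : List (Int × Int) → List (Int × Int)
  | [] => []
  | e :: rest => if e.1 = v then [e] else e :: pvTakeThrough v rest

def min_power_kruskal_2_alt (kruskal_dict : List (Int × List Int)) (src : Int) (dest : Int) : Int × List Int :=
  -- trivial query: the path from a node to itself needs no climbing
  if src = dest then (0, [src]) else
  let left := pvChain kruskal_dict src
  let right := pvChain kruskal_dict dest
  let rs := PySem.Set.ofList (right.map Prod.fst)
  let sc := pvScan rs left
  let part :=
    if sc.2 = src then
      -- src is an ancestor of dest: the path is the dest-side chain down to src,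
      -- listed (as the callers expect) from dest back to src
      pvTakeThrough src right
    else
      sc.1 ++ (right.takeWhile (fun e => e.1 != sc.2)).reverse
  ((part.map Prod.snd).foldl (fun m p => if p > m then p else m) 0, part.map Prod.fst)

-- ===== PRECONDITION & SPEC =====
-- Condition-side accessors, phrased with plain library list combinators on the raw
-- association list (first matching entry = Python dict lookup; entry = [depth, parent, power, …]):
def pvEntryOf (d : List (Int × List Int)) (x : Int) : List Int :=
  ((d.filter (fun p => p.1 = x)).map Prod.snd).headD []
def pvHasKey (d : List (Int × List Int)) (x : Int) : Prop := x ∈ d.map Prod.fst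
def pvDepth (d : List (Int × List Int)) (x : Int) : Int := (pvEntryOf d x).headD 0
def pvParent (d : List (Int × List Int)) (x : Int) : Int := (pvEntryOf d x).tail.headD 0

-- Pre_: either the trivial query src = dest on a present key (A answers it without climbing),
-- or the dict is a well-formed rooted forest in the format find_path_kruskal2 expects
-- (distinct keys, each mapped to [depth, parent, power, …] with depth ≥ 0 and the parent a
-- key one level shallower), and src and dest are keys of the same tree (iterating the parent
-- map depth-many times from either one reaches the same root). This is the function's natural
-- domain: outside it A raises KeyError/IndexError, its climbing loops never terminate, or the
-- dict is depth-inconsistent so that A's locally-counted climb reads nodes B never needs;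
-- such accidental inputs are deliberately outside the claim (see claim.json's cites).
def Pre_min_power_kruskal_2 (kruskal_dict : List (Int × List Int)) (src : Int) (dest : Int) : Prop :=
  (src = dest ∧ pvHasKey kruskal_dict src ∧ 1 ≤ (pvEntryOf kruskal_dict src).length) ∨
    ((kruskal_dict.map Prod.fst).Nodup ∧
      (∀ p ∈ kruskal_dict, 3 ≤ p.2.length ∧ 0 ≤ p.2.headD 0 ∧
        (0 < p.2.headD 0 → pvHasKey kruskal_dict (p.2.tail.headD 0) ∧
          pvDepth kruskal_dict (p.2.tail.headD 0) = p.2.headD 0 - 1)) ∧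
      pvHasKey kruskal_dict src ∧ pvHasKey kruskal_dict dest ∧
      (pvParent kruskal_dict)^[(pvDepth kruskal_dict src).toNat] src =
        (pvParent kruskal_dict)^[(pvDepth kruskal_dict dest).toNat] dest)

instance (kruskal_dict : List (Int × List Int)) (src : Int) (dest : Int) :
    Decidable (Pre_min_power_kruskal_2 kruskal_dict src dest) := by
  unfold Pre_min_power_kruskal_2 pvHasKey; infer_instance

def pvWitness_min_power_kruskal_2 : (List (Int × List Int)) × Int × Int :=
  ([(1, [0, 1, 0]), (2, [1, 1, 5])], 2, 1)

def Spec_min_power_kruskal_2 (kruskal_dict : List (Int × List Int)) (src : Int) (dest : Int) (out : Int × List Int) : Prop :=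
  out = min_power_kruskal_2_alt kruskal_dict src dest

instance (kruskal_dict : List (Int × List Int)) (src : Int) (dest : Int) (out : Int × List Int) :
    Decidable (Spec_min_power_kruskal_2 kruskal_dict src dest out) := by
  unfold Spec_min_power_kruskal_2; infer_instance

-- ===== CLAIM (what is proved, stated in full; the proofs are below) =====
def Claim_equal_min_power_kruskal_2 : Prop := ∀ (kruskal_dict : List (Int × List Int)) (src : Int) (dest : Int), Dom_min_power_kruskal_2 kruskal_dict src dest → Pre_min_power_kruskal_2 kruskal_dict src dest → Spec_min_power_kruskal_2 kruskal_dict src dest (min_power_kruskal_2 kruskal_dict src dest)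

-- ===== LEMMAS AND PROOFS =====

-- proof-side ancestor iteration and lookup facts about the ports' accessors
def pvAnc (d : List (Int × List Int)) : Nat → Int → Int
  | 0, x => x
  | n + 1, x => pvAnc d n (pvPar d x)

def pvKey (d : List (Int × List Int)) (x : Int) : Prop :=
  ((PySem.Dict.mk d).get? x).isSome = true

def pvGoodKey (d : List (Int × List Int)) (x : Int) : Prop :=
  3 ≤ (pvGet d x).length ∧ 0 ≤ pvDep d x ∧
    (0 < pvDep d x → pvKey d (pvPar d x) ∧ pvDep d (pvPar d x) = pvDep d x - 1)

theorem pv_entry_eq (d : List (Int × List Int)) (x : Int) : pvEntryOf d x = pvGet d x := by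
  unfold pvEntryOf pvGet
  show _ = ((d.find? (fun p => p.1 == x)).map Prod.snd).getD []
  induction d with
  | nil => rfl
  | cons p rest ih =>
    simp only [List.filter_cons, List.find?_cons]
    by_cases h : p.1 = x
    · have hb : (p.1 == x) = true := by simpa using h
      simp [h]
    · have hb : (p.1 == x) = false := by simpa using h
      simp only [hb, h, decide_false, Bool.false_eq_true, if_false]
      exact ih

theorem pv_haskey_iff (d : List (Int × List Int)) (x : Int) :
    pvHasKey d x ↔ pvKey d x := by
  unfold pvHasKey pvKey
  show _ ↔ ((d.find? (fun p => p.1 == x)).map Prod.snd).isSome = true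
  rw [Option.isSome_map, List.find?_isSome]
  constructor
  · intro hx
    obtain ⟨q, hq, rfl⟩ := List.mem_map.mp hx
    exact ⟨q, hq, by simp⟩
  · rintro ⟨q, hq, hqx⟩
    simp only [beq_iff_eq] at hqx
    exact List.mem_map.mpr ⟨q, hq, hqx⟩

theorem pv_headD_getD (l : List Int) : l.headD 0 = PySem.List.pyGetD l 0 0 := by
  rw [PySem.List.pyGetD_ofNat']
  cases l <;> rfl

theorem pv_tail_headD_getD (l : List Int) : l.tail.headD 0 = PySem.List.pyGetD l 1 0 := by
  rw [PySem.List.pyGetD_ofNat']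
  match l with
  | [] => rfl
  | [_] => rfl
  | _ :: _ :: _ => rfl

theorem pv_depth_eq (d : List (Int × List Int)) (x : Int) : pvDepth d x = pvDep d x := by
  unfold pvDepth pvDep
  rw [pv_entry_eq, pv_headD_getD]

theorem pv_parent_eq (d : List (Int × List Int)) (x : Int) : pvParent d x = pvPar d x := by
  unfold pvParent pvPar
  rw [pv_entry_eq, pv_tail_headD_getD]

theorem pv_iter_eq (d : List (Int × List Int)) :
    ∀ (n : Nat) (x : Int), (pvParent d)^[n] x = pvAnc d n x := by
  intro n
  induction n with
  | zero => intro x; rfl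
  | succ n ih =>
    intro x
    rw [Function.iterate_succ_apply, pv_parent_eq]
    exact ih (pvPar d x)

-- the entries the climbing loops append, as a function of the start node and the step count
def pvSteps (d : List (Int × List Int)) : Nat → Int → List (Int × Int)
  | 0, _ => []
  | n + 1, x => (pvPar d x, pvPw d x) :: pvSteps d n (pvPar d x)

-- number of lockstep steps until the two climbs meet (within n steps)
def pvMeet (d : List (Int × List Int)) : Nat → Int → Int → Nat
  | 0, _, _ => 0
  | n + 1, x, y => if x = y then 0 else pvMeet d n (pvPar d x) (pvPar d y) + 1

theorem pv_anc_add (d : List (Int × List Int)) (a b : Nat) (x : Int) :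
    pvAnc d (a + b) x = pvAnc d b (pvAnc d a x) := by
  induction a generalizing x with
  | zero => simp [pvAnc]
  | succ a ih => rw [Nat.succ_add]; simp only [pvAnc]; exact ih (pvPar d x)

theorem pv_steps_add (d : List (Int × List Int)) (a b : Nat) (x : Int) :
    pvSteps d (a + b) x = pvSteps d a x ++ pvSteps d b (pvAnc d a x) := by
  induction a generalizing x with
  | zero => simp [pvSteps, pvAnc]
  | succ a ih => rw [Nat.succ_add]; simp only [pvSteps, pvAnc, List.cons_append]; rw [ih]

theorem pv_steps_snoc (d : List (Int × List Int)) (n : Nat) (x : Int) :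
    pvSteps d (n + 1) x =
      pvSteps d n x ++ [(pvAnc d (n + 1) x, pvPw d (pvAnc d n x))] := by
  rw [pv_steps_add d n 1 x]
  have h : pvAnc d (n + 1) x = pvPar d (pvAnc d n x) := by
    rw [pv_anc_add d n 1 x]; rfl
  simp [pvSteps, h]

theorem pv_map_fst_steps (d : List (Int × List Int)) (n : Nat) (x : Int) :
    (pvSteps d n x).map Prod.fst = (List.range n).map (fun j => pvAnc d (j + 1) x) := by
  induction n generalizing x with
  | zero => simp [pvSteps]
  | succ n ih =>
    simp only [pvSteps, List.map_cons]
    rw [ih, List.range_succ_eq_map, List.map_cons, List.map_map]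
    exact congrArg₂ _ rfl (List.map_congr_left fun j _ => rfl)

theorem pv_ph1_left (d : List (Int × List Int)) (k : Nat) :
    ∀ (x y : Int) (lg ld : List (Int × Int)) (c : Int),
      pvPhase1 d k x y lg ld (c + k) c = (pvAnc d k x, y, lg ++ pvSteps d k x, ld) := by
  induction k with
  | zero => intro x y lg ld c; simp [pvPhase1, pvAnc, pvSteps]
  | succ k ih =>
    intro x y lg ld c
    show pvPhase1 d (k + 1) x y lg ld (c + ((k : Int) + 1)) c = _
    rw [pvPhase1]
    rw [if_neg (by omega), if_pos (by omega)]
    have h1 : c + ((k : Int) + 1) - 1 = c + k := by ring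
    rw [h1, ih]
    simp [pvAnc, pvSteps, List.append_assoc]

theorem pv_ph1_right (d : List (Int × List Int)) (k : Nat) :
    ∀ (x y : Int) (lg ld : List (Int × Int)) (c : Int),
      pvPhase1 d k x y lg ld c (c + k) = (x, pvAnc d k y, lg, ld ++ pvSteps d k y) := by
  induction k with
  | zero => intro x y lg ld c; simp [pvPhase1, pvAnc, pvSteps]
  | succ k ih =>
    intro x y lg ld c
    show pvPhase1 d (k + 1) x y lg ld c (c + ((k : Int) + 1)) = _
    rw [pvPhase1]
    rw [if_neg (by omega), if_neg (by omega)]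
    have h1 : c + ((k : Int) + 1) - 1 = c + k := by ring
    rw [h1, ih]
    simp [pvAnc, pvSteps, List.append_assoc]

theorem pv_meet_le (d : List (Int × List Int)) : ∀ (n : Nat) (x y : Int), pvMeet d n x y ≤ n := by
  intro n
  induction n with
  | zero => intro x y; simp [pvMeet]
  | succ n ih =>
    intro x y
    by_cases h : x = y
    · simp [pvMeet, h]
    · simp only [pvMeet, if_neg h]
      exact Nat.succ_le_succ (ih _ _)

theorem pv_meet_anc (d : List (Int × List Int)) :
    ∀ (n : Nat) (x y : Int), pvAnc d n x = pvAnc d n y →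
      pvAnc d (pvMeet d n x y) x = pvAnc d (pvMeet d n x y) y := by
  intro n
  induction n with
  | zero => intro x y h; simpa [pvMeet, pvAnc] using h
  | succ n ih =>
    intro x y h
    by_cases hxy : x = y
    · simp [pvMeet, hxy, pvAnc]
    · simp only [pvMeet, if_neg hxy]
      simp only [pvAnc] at h ⊢
      exact ih _ _ h

theorem pv_meet_min (d : List (Int × List Int)) :
    ∀ (n : Nat) (x y : Int) (t : Nat), t < pvMeet d n x y → pvAnc d t x ≠ pvAnc d t y := by
  intro n
  induction n with
  | zero => intro x y t ht; simp [pvMeet] at ht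
  | succ n ih =>
    intro x y t ht
    by_cases hxy : x = y
    · simp [pvMeet, hxy] at ht
    · simp only [pvMeet, if_neg hxy] at ht
      match t with
      | 0 => simpa [pvAnc] using hxy
      | t + 1 =>
        simp only [pvAnc]
        exact ih _ _ t (by omega)

theorem pv_ph2 (d : List (Int × List Int)) :
    ∀ (n : Nat) (x y : Int), pvAnc d n x = pvAnc d n y →
      ∀ (fuel : Nat), n ≤ fuel → ∀ (lg ld : List (Int × Int)),
        pvPhase2 d fuel x y lg ld =
          (lg ++ pvSteps d (pvMeet d n x y) x, ld ++ pvSteps d (pvMeet d n x y) y) := by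
  intro n
  induction n with
  | zero =>
    intro x y h fuel _ lg ld
    simp only [pvAnc] at h
    cases fuel with
    | zero => simp [pvPhase2, pvMeet, pvSteps]
    | succ f => simp [pvPhase2, h, pvMeet, pvSteps]
  | succ n ih =>
    intro x y h fuel hf lg ld
    obtain ⟨f, rfl⟩ : ∃ f, fuel = f + 1 := ⟨fuel - 1, by omega⟩
    by_cases hxy : x = y
    · simp [pvPhase2, hxy, pvMeet, pvSteps]
    · simp only [pvPhase2, if_neg hxy, pvMeet]
      simp only [pvAnc] at h
      rw [ih _ _ h f (by omega)]
      simp [pvSteps, List.append_assoc]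

theorem pv_good_of_key (d : List (Int × List Int)) (x : Int)
    (hG : ∀ p ∈ d, pvGoodKey d p.1) (hx : pvKey d x) : pvGoodKey d x := by
  obtain ⟨v, hv⟩ := Option.isSome_iff_exists.mp hx
  exact hG (x, v) (PySem.Dict.mem_items_of_get?_eq_some (PySem.Dict.mk d) hv)

theorem pv_pre_elim (d : List (Int × List Int)) (src dest : Int)
    (h : Pre_min_power_kruskal_2 d src dest) (hsd : src ≠ dest) :
    (∀ p ∈ d, pvGoodKey d p.1) ∧ pvKey d src ∧ pvKey d dest ∧
      pvAnc d (pvDep d src).natAbs src = pvAnc d (pvDep d dest).natAbs dest := by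
  obtain ⟨heq, -⟩ | ⟨hnd, hall, hs, hd, hroot⟩ := h
  · exact absurd heq hsd
  have hknd : (PySem.Dict.mk d).keys.Nodup := hnd
  have hG : ∀ p ∈ d, pvGoodKey d p.1 := by
    intro p hp
    have hget : (PySem.Dict.mk d).get? p.1 = some p.2 :=
      PySem.Dict.get?_of_mem_items (PySem.Dict.mk d) hp hknd
    obtain ⟨h3, h0, hpar⟩ := hall p hp
    have hgetv : pvGet d p.1 = p.2 := by rw [pvGet, hget]; rfl
    have hdepv : pvDep d p.1 = p.2.headD 0 := by
      rw [pvDep, hgetv, ← pv_headD_getD]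
    have hparv : pvPar d p.1 = p.2.tail.headD 0 := by
      rw [pvPar, hgetv, ← pv_tail_headD_getD]
    refine ⟨by rw [hgetv]; exact h3, by rw [hdepv]; exact h0, ?_⟩
    intro hpos
    obtain ⟨hk, hdp⟩ := hpar (by rwa [← hdepv])
    refine ⟨by rw [hparv, ← pv_haskey_iff]; exact hk, ?_⟩
    rw [hparv] at *
    rw [← pv_depth_eq, hdp, hdepv]
  have hs' : pvKey d src := (pv_haskey_iff d src).mp hs
  have hd' : pvKey d dest := (pv_haskey_iff d dest).mp hd
  refine ⟨hG, hs', hd', ?_⟩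
  have h0s : 0 ≤ pvDep d src := (pv_good_of_key d src hG hs').2.1
  have h0d : 0 ≤ pvDep d dest := (pv_good_of_key d dest hG hd').2.1
  have hts : (pvDepth d src).toNat = (pvDep d src).natAbs := by rw [pv_depth_eq]; omega
  have htd : (pvDepth d dest).toNat = (pvDep d dest).natAbs := by rw [pv_depth_eq]; omega
  rw [hts, htd, pv_iter_eq, pv_iter_eq] at hroot
  exact hroot

theorem pv_anc_facts (d : List (Int × List Int)) (hG : ∀ p ∈ d, pvGoodKey d p.1) :
    ∀ (i : Nat) (x : Int), pvKey d x → (i : Int) ≤ pvDep d x →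
      pvKey d (pvAnc d i x) ∧ pvDep d (pvAnc d i x) = pvDep d x - i := by
  intro i
  induction i with
  | zero => intro x hx _; simpa [pvAnc] using hx
  | succ i ih =>
    intro x hx hi
    have hpos : 0 < pvDep d x := by push_cast at hi; omega
    obtain ⟨hkp, hdp⟩ := (pv_good_of_key d x hG hx).2.2 hpos
    have := ih (pvPar d x) hkp (by rw [hdp]; push_cast at hi ⊢; omega)
    simp only [pvAnc]
    refine ⟨this.1, ?_⟩
    rw [this.2, hdp]; push_cast; ring

theorem pv_climb_eq (d : List (Int × List Int)) (hG : ∀ p ∈ d, pvGoodKey d p.1) :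
    ∀ (n : Nat) (x : Int), pvKey d x → (n : Int) ≤ pvDep d x →
      pvClimb d n x = pvSteps d n x := by
  intro n
  induction n with
  | zero => intro x _ _; rfl
  | succ n ih =>
    intro x hx hn
    have hpos : 0 < pvDep d x := by push_cast at hn; omega
    obtain ⟨hkp, hdp⟩ := (pv_good_of_key d x hG hx).2.2 hpos
    simp only [pvClimb, pvSteps, if_pos hpos]
    rw [ih (pvPar d x) hkp (by rw [hdp]; push_cast at hn ⊢; omega)]

theorem pv_chain_eq (d : List (Int × List Int)) (hG : ∀ p ∈ d, pvGoodKey d p.1)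
    (x : Int) (hx : pvKey d x) :
    pvChain d x = (x, (0 : Int)) :: pvSteps d (pvDep d x).natAbs x := by
  have h0 : 0 ≤ pvDep d x := (pv_good_of_key d x hG hx).2.1
  unfold pvChain
  rw [pv_climb_eq d hG _ x hx (by rw [Int.natAbs_of_nonneg h0])]

theorem pv_scan_spec (rs : PySem.Set Int) :
    ∀ (pre : List (Int × Int)) (e : Int × Int) (rest : List (Int × Int)),
      (∀ f ∈ pre, rs.contains f.1 = false) → rs.contains e.1 = true →
        pvScan rs (pre ++ e :: rest) = (pre ++ [e], e.1) := by
  intro pre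
  induction pre with
  | nil =>
    intro e rest _ he
    simp only [List.nil_append, pvScan]
    rw [if_pos he]
  | cons f pre ih =>
    intro e rest hpre he
    have hf : rs.contains f.1 = false := hpre f (by simp)
    simp only [List.cons_append, pvScan]
    rw [if_neg (fun h => by rw [hf] at h; exact Bool.false_ne_true h), ih e rest (fun g hg => hpre g (by simp [hg])) he]

theorem pv_tw_spec (v : Int) :
    ∀ (pre : List (Int × Int)) (e : Int × Int) (rest : List (Int × Int)),
      (∀ f ∈ pre, f.1 ≠ v) → e.1 = v →
        List.takeWhile (fun f => f.1 != v) (pre ++ e :: rest) = pre := by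
  intro pre
  induction pre with
  | nil => intro e rest _ he; simp [he]
  | cons f pre ih =>
    intro e rest hpre he
    have hf : f.1 ≠ v := hpre f (by simp)
    simp only [List.cons_append, List.takeWhile_cons, bne_iff_ne, ne_eq, hf,
      not_false_eq_true, if_pos]
    rw [ih e rest (fun g hg => hpre g (by simp [hg])) he]

theorem pv_tt_spec (v : Int) :
    ∀ (pre : List (Int × Int)) (e : Int × Int) (rest : List (Int × Int)),
      (∀ f ∈ pre, f.1 ≠ v) → e.1 = v →
        pvTakeThrough v (pre ++ e :: rest) = pre ++ [e] := by
  intro pre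
  induction pre with
  | nil =>
    intro e rest _ he
    simp only [List.nil_append, pvTakeThrough]
    rw [if_pos he]
  | cons f pre ih =>
    intro e rest hpre he
    have hf : f.1 ≠ v := hpre f (by simp)
    simp only [List.cons_append, pvTakeThrough, if_neg hf]
    rw [ih e rest (fun g hg => hpre g (by simp [hg])) he]

theorem pv_fold_split :
    ∀ (l : List (Int × Int)) (m0 : Int) (ns : List Int),
      l.foldl (fun acc i => (if i.2 > acc.1 then i.2 else acc.1, acc.2 ++ [i.1])) (m0, ns)
        = ((l.map Prod.snd).foldl (fun m p => if p > m then p else m) m0,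
            ns ++ l.map Prod.fst) := by
  intro l
  induction l with
  | nil => intro m0 ns; simp
  | cons e l ih => intro m0 ns; simp [ih, List.append_assoc]

theorem pv_witness_ok :
    Dom_min_power_kruskal_2 (pvWitness_min_power_kruskal_2.1) (pvWitness_min_power_kruskal_2.2.1) (pvWitness_min_power_kruskal_2.2.2) ∧
      Pre_min_power_kruskal_2 (pvWitness_min_power_kruskal_2.1) (pvWitness_min_power_kruskal_2.2.1) (pvWitness_min_power_kruskal_2.2.2) := by
  decide

theorem pv_meet_self (d : List (Int × List Int)) (n : Nat) (x : Int) : pvMeet d n x x = 0 := by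
  cases n <;> simp [pvMeet]

theorem pv_contains_rn (d : List (Int × List Int)) (hG : ∀ p ∈ d, pvGoodKey d p.1)
    (dest : Int) (hkd : pvKey d dest) (b : Nat) (hb : (b : Int) = pvDep d dest) (y : Int) :
    ((PySem.Set.ofList ((pvChain d dest).map Prod.fst)).contains y = true) ↔
      ∃ j : Nat, j ≤ b ∧ y = pvAnc d j dest := by
  rw [PySem.Set.contains_iff, PySem.Set.mem_ofList, pv_chain_eq d hG dest hkd]
  have hb' : (pvDep d dest).natAbs = b := by omega
  rw [hb']
  simp only [List.map_cons, pv_map_fst_steps, List.mem_cons, List.mem_map, List.mem_range]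
  constructor
  · rintro (rfl | ⟨j, hj, rfl⟩)
    · exact ⟨0, by omega, rfl⟩
    · exact ⟨j + 1, by omega, rfl⟩
  · rintro ⟨j, hj, rfl⟩
    match j with
    | 0 => exact Or.inl rfl
    | j + 1 => exact Or.inr ⟨j, by omega, rfl⟩

theorem pv_scan_chain (d : List (Int × List Int)) (hG : ∀ p ∈ d, pvGoodKey d p.1)
    (src : Int) (hks : pvKey d src) (rs : PySem.Set Int) (i0 a : Nat)
    (hi0 : i0 ≤ a) (ha : (a : Int) = pvDep d src)
    (hnot : ∀ i, i < i0 → rs.contains (pvAnc d i src) = false)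
    (hin : rs.contains (pvAnc d i0 src) = true) :
    pvScan rs (pvChain d src) = ((src, 0) :: pvSteps d i0 src, pvAnc d i0 src) := by
  rw [pv_chain_eq d hG src hks]
  have ha' : (pvDep d src).natAbs = a := by omega
  rw [ha']
  match i0, hi0, hnot, hin with
  | 0, _, _, hin =>
    simp only [pvScan]
    rw [if_pos (show rs.contains src = true from hin)]
    simp [pvSteps, pvAnc]
  | i' + 1, hi0, hnot, hin =>
    have hsplit : pvSteps d a src =
        (pvSteps d i' src ++ [(pvAnc d (i' + 1) src, pvPw d (pvAnc d i' src))]) ++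
          pvSteps d (a - (i' + 1)) (pvAnc d (i' + 1) src) := by
      rw [← pv_steps_snoc, ← pv_steps_add]
      congr 1
      omega
    rw [hsplit]
    have hre : (src, (0 : Int)) ::
        ((pvSteps d i' src ++ [(pvAnc d (i' + 1) src, pvPw d (pvAnc d i' src))]) ++
          pvSteps d (a - (i' + 1)) (pvAnc d (i' + 1) src)) =
        ((src, (0 : Int)) :: pvSteps d i' src) ++
          (pvAnc d (i' + 1) src, pvPw d (pvAnc d i' src)) ::
            pvSteps d (a - (i' + 1)) (pvAnc d (i' + 1) src) := by
      simp
    rw [hre, pv_scan_spec rs _ _ _ ?_ hin]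
    · simp [pv_steps_snoc]
    · intro f hf
      rcases List.mem_cons.mp hf with rfl | hf'
      · exact hnot 0 (by omega)
      · have : f.1 ∈ (pvSteps d i' src).map Prod.fst := List.mem_map_of_mem hf'
        rw [pv_map_fst_steps] at this
        obtain ⟨j, hj, hj2⟩ := List.mem_map.mp this
        rw [List.mem_range] at hj
        rw [← hj2]
        exact hnot (j + 1) (by omega)

theorem pv_tw_chain (d : List (Int × List Int)) (hG : ∀ p ∈ d, pvGoodKey d p.1)
    (dest : Int) (hkd : pvKey d dest) (v : Int) (j' b : Nat)
    (hj : j' + 1 ≤ b) (hb : (b : Int) = pvDep d dest)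
    (hne : ∀ j, j ≤ j' → pvAnc d j dest ≠ v) (hv : pvAnc d (j' + 1) dest = v) :
    List.takeWhile (fun e => e.1 != v) (pvChain d dest) =
      (dest, (0 : Int)) :: pvSteps d j' dest := by
  rw [pv_chain_eq d hG dest hkd]
  have hb' : (pvDep d dest).natAbs = b := by omega
  rw [hb']
  have hsplit : pvSteps d b dest =
      (pvSteps d j' dest ++ [(pvAnc d (j' + 1) dest, pvPw d (pvAnc d j' dest))]) ++
        pvSteps d (b - (j' + 1)) (pvAnc d (j' + 1) dest) := by
    rw [← pv_steps_snoc, ← pv_steps_add]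
    congr 1
    omega
  rw [hsplit]
  have hre : (dest, (0 : Int)) ::
      ((pvSteps d j' dest ++ [(pvAnc d (j' + 1) dest, pvPw d (pvAnc d j' dest))]) ++
        pvSteps d (b - (j' + 1)) (pvAnc d (j' + 1) dest)) =
      ((dest, (0 : Int)) :: pvSteps d j' dest) ++
        (pvAnc d (j' + 1) dest, pvPw d (pvAnc d j' dest)) ::
          pvSteps d (b - (j' + 1)) (pvAnc d (j' + 1) dest) := by
    simp
  rw [hre, pv_tw_spec v _ _ _ ?_ hv]
  intro f hf
  rcases List.mem_cons.mp hf with rfl | hf'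
  · exact hne 0 (by omega)
  · have : f.1 ∈ (pvSteps d j' dest).map Prod.fst := List.mem_map_of_mem hf'
    rw [pv_map_fst_steps] at this
    obtain ⟨j, hj2, hj3⟩ := List.mem_map.mp this
    rw [List.mem_range] at hj2
    rw [← hj3]
    exact hne (j + 1) (by omega)

theorem pv_tt_chain (d : List (Int × List Int)) (hG : ∀ p ∈ d, pvGoodKey d p.1)
    (dest : Int) (hkd : pvKey d dest) (v : Int) (j' b : Nat)
    (hj : j' + 1 ≤ b) (hb : (b : Int) = pvDep d dest)
    (hne : ∀ j, j ≤ j' → pvAnc d j dest ≠ v) (hv : pvAnc d (j' + 1) dest = v) :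
    pvTakeThrough v (pvChain d dest) =
      (dest, (0 : Int)) :: pvSteps d (j' + 1) dest := by
  rw [pv_chain_eq d hG dest hkd]
  have hb' : (pvDep d dest).natAbs = b := by omega
  rw [hb']
  have hsplit : pvSteps d b dest =
      (pvSteps d j' dest ++ [(pvAnc d (j' + 1) dest, pvPw d (pvAnc d j' dest))]) ++
        pvSteps d (b - (j' + 1)) (pvAnc d (j' + 1) dest) := by
    rw [← pv_steps_snoc, ← pv_steps_add]
    congr 1
    omega
  rw [hsplit]
  have hre : (dest, (0 : Int)) ::
      ((pvSteps d j' dest ++ [(pvAnc d (j' + 1) dest, pvPw d (pvAnc d j' dest))]) ++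
        pvSteps d (b - (j' + 1)) (pvAnc d (j' + 1) dest)) =
      ((dest, (0 : Int)) :: pvSteps d j' dest) ++
        (pvAnc d (j' + 1) dest, pvPw d (pvAnc d j' dest)) ::
          pvSteps d (b - (j' + 1)) (pvAnc d (j' + 1) dest) := by
    simp
  rw [hre, pv_tt_spec v _ _ _ ?_ hv]
  · rw [pv_steps_snoc]
    simp
  intro f hf
  rcases List.mem_cons.mp hf with rfl | hf'
  · exact hne 0 (by omega)
  · have : f.1 ∈ (pvSteps d j' dest).map Prod.fst := List.mem_map_of_mem hf'
    rw [pv_map_fst_steps] at this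
    obtain ⟨j, hj2, hj3⟩ := List.mem_map.mp this
    rw [List.mem_range] at hj2
    rw [← hj3]
    exact hne (j + 1) (by omega)

theorem pv_anc_inj (d : List (Int × List Int)) (hG : ∀ p ∈ d, pvGoodKey d p.1)
    (x : Int) (hx : pvKey d x) (i j : Nat)
    (hi : (i : Int) ≤ pvDep d x) (hj : (j : Int) ≤ pvDep d x)
    (h : pvAnc d i x = pvAnc d j x) : i = j := by
  have h1 := (pv_anc_facts d hG i x hx hi).2
  have h2 := (pv_anc_facts d hG j x hx hj).2
  rw [h] at h1
  omega

theorem pv_assemble (d : List (Int × List Int)) (src dest : Int) (hsd : src ≠ dest)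
    (SL SR : List (Int × Int)) (v : Int) (hvs : v ≠ src)
    (hpath : pvFindPath d src dest =
      ((src, (0 : Int)) :: SL) ++ ((dest, (0 : Int)) :: SR).reverse)
    (hscan : pvScan (PySem.Set.ofList ((pvChain d dest).map Prod.fst)) (pvChain d src) =
      ((src, (0 : Int)) :: SL, v))
    (htw : List.takeWhile (fun e => e.1 != v) (pvChain d dest) =
      (dest, (0 : Int)) :: SR) :
    min_power_kruskal_2 d src dest = min_power_kruskal_2_alt d src dest := by
  unfold min_power_kruskal_2 min_power_kruskal_2_alt
  rw [if_neg hsd]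
  simp only [hpath, hscan, htw, if_neg hvs]
  simp only [List.cons_append, PySem.List.pyGetD_zero_cons, pv_fold_split,
    List.nil_append]

theorem pv_assemble1 (d : List (Int × List Int)) (src dest : Int) (hsd : src ≠ dest)
    (SL : List (Int × Int)) (v : Int) (hvs : v ≠ src)
    (hpath : pvFindPath d src dest = (src, (0 : Int)) :: SL)
    (hscan : pvScan (PySem.Set.ofList ((pvChain d dest).map Prod.fst)) (pvChain d src) =
      ((src, (0 : Int)) :: SL, v))
    (htw : List.takeWhile (fun e => e.1 != v) (pvChain d dest) = []) :
    min_power_kruskal_2 d src dest = min_power_kruskal_2_alt d src dest := by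
  unfold min_power_kruskal_2 min_power_kruskal_2_alt
  rw [if_neg hsd]
  simp only [hpath, hscan, htw, if_neg hvs]
  simp only [List.reverse_nil, PySem.List.pyGetD_zero_cons, pv_fold_split,
    List.nil_append, List.append_nil]

theorem pv_assemble2 (d : List (Int × List Int)) (src dest : Int) (hsd : src ≠ dest)
    (SR : List (Int × Int))
    (hpath : pvFindPath d src dest = (dest, (0 : Int)) :: SR)
    (hscan : pvScan (PySem.Set.ofList ((pvChain d dest).map Prod.fst)) (pvChain d src) =
      ([(src, (0 : Int))], src))
    (htt : pvTakeThrough src (pvChain d dest) = (dest, (0 : Int)) :: SR) :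
    min_power_kruskal_2 d src dest = min_power_kruskal_2_alt d src dest := by
  unfold min_power_kruskal_2 min_power_kruskal_2_alt
  rw [if_neg hsd]
  simp only [hpath, hscan, htt, if_true]
  simp only [PySem.List.pyGetD_zero_cons, pv_fold_split, List.nil_append]

theorem pv_trivial (d : List (Int × List Int)) (x : Int) :
    min_power_kruskal_2 d x x = min_power_kruskal_2_alt d x x := by
  unfold min_power_kruskal_2 min_power_kruskal_2_alt pvFindPath
  simp [sub_self, pvPhase1]

theorem pv_main_eq (d : List (Int × List Int)) (src dest : Int)
    (hpre : Pre_min_power_kruskal_2 d src dest) :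
    min_power_kruskal_2 d src dest = min_power_kruskal_2_alt d src dest := by
  by_cases hsd0 : src = dest
  · subst hsd0
    exact pv_trivial d src
  obtain ⟨hG, hks, hkd, hroot⟩ := pv_pre_elim d src dest hpre hsd0
  have hgs := pv_good_of_key d src hG hks
  have hgd := pv_good_of_key d dest hG hkd
  have haI : ((pvDep d src).natAbs : Int) = pvDep d src := Int.natAbs_of_nonneg hgs.2.1
  have hbI : ((pvDep d dest).natAbs : Int) = pvDep d dest := Int.natAbs_of_nonneg hgd.2.1
  set a := (pvDep d src).natAbs with ha'
  set b := (pvDep d dest).natAbs with hb'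
  by_cases hLE : pvDep d dest ≤ pvDep d src
  · -- src at least as deep: phase 1 climbs the src side k = a - b steps
    set k := a - b with hk'
    have hfuel : (pvDep d src - pvDep d dest).natAbs = k := by omega
    have hca : pvDep d src = pvDep d dest + (k : Int) := by omega
    have hr : pvPhase1 d (pvDep d src - pvDep d dest).natAbs src dest
        [(src, 0)] [(dest, 0)] (pvDep d src) (pvDep d dest) =
        (pvAnc d k src, dest, (src, (0 : Int)) :: pvSteps d k src, [(dest, (0 : Int))]) := by
      rw [hfuel, hca, pv_ph1_left]
      simp
    have hkk : (k : Int) ≤ pvDep d src := by omega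
    have hstf := pv_anc_facts d hG k src hks hkk
    have hroot' : pvAnc d b (pvAnc d k src) = pvAnc d b dest := by
      rw [← pv_anc_add d k b src]
      have hkb : k + b = a := by omega
      rw [hkb, hroot]
    set m := pvMeet d b (pvAnc d k src) dest with hm'
    have hmle : m ≤ b := pv_meet_le d b (pvAnc d k src) dest
    have hmanc := pv_meet_anc d b (pvAnc d k src) dest hroot'
    have hmmin := pv_meet_min d b (pvAnc d k src) dest
    rw [← hm'] at hmanc
    simp only [← hm'] at hmmin
    have hnotin : ∀ i, i < k + m →
        (PySem.Set.ofList ((pvChain d dest).map Prod.fst)).contains (pvAnc d i src) = false := by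
      intro i hi
      by_contra hc
      have hc' : (PySem.Set.ofList ((pvChain d dest).map Prod.fst)).contains (pvAnc d i src) = true := by
        revert hc; cases ((PySem.Set.ofList ((pvChain d dest).map Prod.fst)).contains (pvAnc d i src)) <;> simp
      rw [pv_contains_rn d hG dest hkd b hbI] at hc'
      obtain ⟨j, hjb, hj⟩ := hc'
      have hia : (i : Int) ≤ pvDep d src := by omega
      have hif := pv_anc_facts d hG i src hks hia
      have hjf := pv_anc_facts d hG j dest hkd (by omega)
      have hdepeq : pvDep d src - i = pvDep d dest - j := by
        rw [← hif.2, ← hjf.2, ← hj]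
      have hik : k ≤ i := by omega
      have hjeq : j = i - k := by omega
      refine hmmin (i - k) (by omega) ?_
      rw [← pv_anc_add d k (i - k) src]
      have hki : k + (i - k) = i := by omega
      rw [hki, hj, hjeq]
    have hin : (PySem.Set.ofList ((pvChain d dest).map Prod.fst)).contains (pvAnc d (k + m) src) = true := by
      rw [pv_contains_rn d hG dest hkd b hbI]
      refine ⟨m, by omega, ?_⟩
      rw [pv_anc_add d k m src, hmanc]
    by_cases hst : pvAnc d k src = dest
    · -- dest is an ancestor of src: A returns the left list
      have hm0 : m = 0 := by rw [hm', hst, pv_meet_self]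
      have hpath : pvFindPath d src dest = (src, (0 : Int)) :: pvSteps d k src := by
        unfold pvFindPath
        rw [hr]
        simp [hst]
      have hscan := pv_scan_chain d hG src hks
        (PySem.Set.ofList ((pvChain d dest).map Prod.fst)) k a (by omega) haI
        (fun i hi => hnotin i (by omega)) (by rw [← Nat.add_zero k, ← hm0]; exact hin)
      rw [hst] at hscan
      refine pv_assemble1 d src dest hsd0 (pvSteps d k src) dest
        (fun h => hsd0 h.symm) hpath hscan ?_
      rw [pv_chain_eq d hG dest hkd]
      simp
    · -- general case: lockstep climb of m ≥ 1 further steps on both sides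
      have hds : dest ≠ src := by
        intro h
        apply hst
        have : pvDep d dest = pvDep d src := by rw [h]
        have hk0 : k = 0 := by omega
        rw [hk0, h]
        rfl
      obtain ⟨m', hmm⟩ : ∃ m', m = m' + 1 := by
        refine ⟨m - 1, ?_⟩
        have : m ≠ 0 := by
          intro h0
          apply hst
          have := hmanc
          rw [h0] at this
          exact this
        omega
      have hvs : pvAnc d (k + m) src ≠ src := by
        intro h
        have := pv_anc_inj d hG src hks (k + m) 0 (by omega) (by omega) h
        omega
      have hpath : pvFindPath d src dest =
          ((src, (0 : Int)) :: pvSteps d (k + m) src) ++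
            ((dest, (0 : Int)) :: pvSteps d m' dest).reverse := by
        unfold pvFindPath
        rw [hr]
        simp only [if_neg hst, if_neg hds]
        rw [pv_ph2 d b (pvAnc d k src) dest hroot' _ (by omega)]
        have h1 : ((src, (0 : Int)) :: pvSteps d k src) ++ pvSteps d m (pvAnc d k src) =
            (src, (0 : Int)) :: pvSteps d (k + m) src := by
          rw [pv_steps_add d k m src]
          simp
        have h2 : [(dest, (0 : Int))] ++ pvSteps d m dest =
            ((dest, (0 : Int)) :: pvSteps d m' dest) ++
              [(pvAnc d m dest, pvPw d (pvAnc d m' dest))] := by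
          rw [hmm, pv_steps_snoc]
          simp
        rw [h1, h2]
        simp only [List.reverse_append, List.reverse_cons, List.reverse_nil,
          List.nil_append, List.singleton_append, PySem.List.pyGetD_zero_cons,
          PySem.List.remove?_cons_self, Option.getD_some]
      have hscan := pv_scan_chain d hG src hks
        (PySem.Set.ofList ((pvChain d dest).map Prod.fst)) (k + m) a (by omega) haI
        hnotin hin
      have hv : pvAnc d (m' + 1) dest = pvAnc d (k + m) src := by
        rw [pv_anc_add d k m src, hmanc, hmm]
      have htw : List.takeWhile (fun e => e.1 != pvAnc d (k + m) src) (pvChain d dest) =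
          (dest, (0 : Int)) :: pvSteps d m' dest := by
        refine pv_tw_chain d hG dest hkd _ m' b (by omega) hbI ?_ hv
        intro j hjm
        rw [← hv]
        intro h
        have := pv_anc_inj d hG dest hkd j (m' + 1) (by omega) (by omega) h
        omega
      exact pv_assemble d src dest hsd0 (pvSteps d (k + m) src) (pvSteps d m' dest)
        (pvAnc d (k + m) src) hvs hpath hscan htw
  · -- dest strictly deeper: phase 1 climbs the dest side k = b - a ≥ 1 steps
    have hLT : pvDep d src < pvDep d dest := by omega
    set k := b - a with hk'
    have hfuel : (pvDep d src - pvDep d dest).natAbs = k := by omega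
    have hca : pvDep d dest = pvDep d src + (k : Int) := by omega
    have hr : pvPhase1 d (pvDep d src - pvDep d dest).natAbs src dest
        [(src, 0)] [(dest, 0)] (pvDep d src) (pvDep d dest) =
        (src, pvAnc d k dest, [(src, (0 : Int))], (dest, (0 : Int)) :: pvSteps d k dest) := by
      rw [hfuel, hca, pv_ph1_right]
      simp
    have hkk : (k : Int) ≤ pvDep d dest := by omega
    have hroot' : pvAnc d a src = pvAnc d a (pvAnc d k dest) := by
      rw [← pv_anc_add d k a dest]
      have hkb : k + a = b := by omega
      rw [hkb, hroot]
    have hsd : src ≠ dest := hsd0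
    by_cases hdt : pvAnc d k dest = src
    · -- src is a proper ancestor of dest: A (and B) return the dest-side chain down to src
      have hk1 : 1 ≤ k := by omega
      have hpath : pvFindPath d src dest = (dest, (0 : Int)) :: pvSteps d k dest := by
        unfold pvFindPath
        rw [hr]
        simp only [if_neg hsd, if_pos hdt]
      have hin0 : (PySem.Set.ofList ((pvChain d dest).map Prod.fst)).contains (pvAnc d 0 src) = true := by
        rw [pv_contains_rn d hG dest hkd b hbI]
        exact ⟨k, by omega, by rw [show pvAnc d 0 src = src from rfl, ← hdt]⟩
      have hscan := pv_scan_chain d hG src hks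
        (PySem.Set.ofList ((pvChain d dest).map Prod.fst)) 0 a (by omega) haI
        (fun i hi => absurd hi (by omega)) hin0
      have hscan' : pvScan (PySem.Set.ofList ((pvChain d dest).map Prod.fst)) (pvChain d src) =
          ([(src, (0 : Int))], src) := by simpa [pvSteps, pvAnc] using hscan
      have htt : pvTakeThrough src (pvChain d dest) =
          (dest, (0 : Int)) :: pvSteps d ((k - 1) + 1) dest := by
        refine pv_tt_chain d hG dest hkd src (k - 1) b (by omega) hbI ?_ ?_
        · intro j hjm
          intro h
          rw [← hdt] at h
          have := pv_anc_inj d hG dest hkd j k (by omega) (by omega) h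
          omega
        · rw [show k - 1 + 1 = k from by omega]
          exact hdt
      rw [show k - 1 + 1 = k from by omega] at htt
      exact pv_assemble2 d src dest hsd0 (pvSteps d k dest) hpath hscan' htt
    · set m := pvMeet d a src (pvAnc d k dest) with hm'
      have hmle : m ≤ a := pv_meet_le d a src (pvAnc d k dest)
      have hmanc := pv_meet_anc d a src (pvAnc d k dest) hroot'
      have hmmin := pv_meet_min d a src (pvAnc d k dest)
      rw [← hm'] at hmanc
      simp only [← hm'] at hmmin
      have hnotin : ∀ i, i < m →
          (PySem.Set.ofList ((pvChain d dest).map Prod.fst)).contains (pvAnc d i src) = false := by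
        intro i hi
        by_contra hc
        have hc' : (PySem.Set.ofList ((pvChain d dest).map Prod.fst)).contains (pvAnc d i src) = true := by
          revert hc
          cases ((PySem.Set.ofList ((pvChain d dest).map Prod.fst)).contains (pvAnc d i src)) <;> simp
        rw [pv_contains_rn d hG dest hkd b hbI] at hc'
        obtain ⟨j, hjb, hj⟩ := hc'
        have hia : (i : Int) ≤ pvDep d src := by omega
        have hif := pv_anc_facts d hG i src hks hia
        have hjf := pv_anc_facts d hG j dest hkd (by omega)
        have hdepeq : pvDep d src - i = pvDep d dest - j := by
          rw [← hif.2, ← hjf.2, ← hj]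
        have hjk : j = k + i := by omega
        refine hmmin i hi ?_
        rw [hj, hjk, pv_anc_add d k i dest]
      have hin : (PySem.Set.ofList ((pvChain d dest).map Prod.fst)).contains (pvAnc d m src) = true := by
        rw [pv_contains_rn d hG dest hkd b hbI]
        refine ⟨k + m, by omega, ?_⟩
        rw [pv_anc_add d k m dest, ← hmanc]
      obtain ⟨m', hmm⟩ : ∃ m', m = m' + 1 := by
        refine ⟨m - 1, ?_⟩
        have hm0 : m ≠ 0 := by
          intro h0
          apply hdt
          have := hmanc
          rw [h0] at this
          exact this.symm
        omega
      have hvs : pvAnc d m src ≠ src := by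
        intro h
        have := pv_anc_inj d hG src hks m 0 (by omega) (by omega) h
        omega
      have hpath : pvFindPath d src dest =
          ((src, (0 : Int)) :: pvSteps d m src) ++
            ((dest, (0 : Int)) :: pvSteps d (k + m') dest).reverse := by
        unfold pvFindPath
        rw [hr]
        simp only [if_neg hsd, if_neg hdt]
        rw [pv_ph2 d a src (pvAnc d k dest) hroot' _ (by omega)]
        have h2 : ((dest, (0 : Int)) :: pvSteps d k dest) ++ pvSteps d m (pvAnc d k dest) =
            ((dest, (0 : Int)) :: pvSteps d (k + m') dest) ++
              [(pvAnc d (k + m' + 1) dest, pvPw d (pvAnc d (k + m') dest))] := by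
          rw [List.cons_append, ← pv_steps_add d k m dest,
            show k + m = (k + m') + 1 from by omega, pv_steps_snoc]
          simp
        rw [h2]
        simp only [List.reverse_append, List.reverse_cons, List.reverse_nil,
          List.nil_append, List.singleton_append, PySem.List.pyGetD_zero_cons,
          PySem.List.remove?_cons_self, Option.getD_some]
        rw [← hm']
      have hscan := pv_scan_chain d hG src hks
        (PySem.Set.ofList ((pvChain d dest).map Prod.fst)) m a (by omega) haI hnotin hin
      have hv : pvAnc d (k + m' + 1) dest = pvAnc d m src := by
        rw [show k + m' + 1 = k + m from by omega, pv_anc_add d k m dest, ← hmanc]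
      have htw : List.takeWhile (fun e => e.1 != pvAnc d m src) (pvChain d dest) =
          (dest, (0 : Int)) :: pvSteps d (k + m') dest := by
        refine pv_tw_chain d hG dest hkd _ (k + m') b (by omega) hbI ?_ hv
        intro j hjm
        rw [← hv]
        intro h
        have := pv_anc_inj d hG dest hkd j (k + m' + 1) (by omega) (by omega) h
        omega
      exact pv_assemble d src dest hsd0 (pvSteps d m src) (pvSteps d (k + m') dest)
        (pvAnc d m src) hvs hpath hscan htw

-- ===== VERDICT (by name: the statement is the Claim_ definition above) =====
theorem min_power_kruskal_2_spec : Claim_equal_min_power_kruskal_2 := by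
  intro kruskal_dict src dest _ hpre
  exact (pv_main_eq kruskal_dict src dest hpre).symm ▸ rfl
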